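-- pv_equiv track=rewrite | github.com/gilad-rubin/hypster | ui/new_app.py | select_initial_parameters
-- ===== SOURCE A (Python) =====
-- from collections import OrderedDict
--
-- def get_available_options(combinations, selected_params):
--     available_options = OrderedDict()
--     all_params = list(OrderedDict.fromkeys(key for comb in combinations for key in comb.keys()))
--
--     for param in all_params:
--         options = set()
--         for comb in combinations:
--             if all(comb.get(k) == v for k, v in selected_params.items() if k < param):
--                 if param in comb:
--                     options.add(comb[param])
--         if options:
--             available_options[param] = sorted(list(options))
--
--     return available_options
--
-- def select_initial_parameters(combinations, defaults):
--     selected = OrderedDict()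
--     for key, default_value in defaults.items():
--         available_options = get_available_options(combinations, selected)
--         if key in available_options and default_value in available_options[key]:
--             selected[key] = default_value
--         elif key in available_options:
--             selected[key] = available_options[key][0]
--         else:
--             break
--     return selected
-- ===== SOURCE B (Python) =====
-- from collections import OrderedDict
--
-- def select_initial_parameters(combinations, defaults):
--     # Recursive greedy pick: for each default key in turn, filter the combinations
--     # compatible with the selection so far, collect that key's values, choose the
--     # default if available else the minimum.
--     def pick(items, selected):
--         if not items:
--             return selected
--         (key, dv), rest = items[0], items[1:]
--         matching = [c for c in combinations
--                     if all(c.get(k) == v for k, v in selected.items() if k < key)]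
--         opts = {c[key] for c in matching if key in c}
--         if not opts:
--             return selected
--         selected[key] = dv if dv in opts else min(opts)
--         return pick(rest, selected)
--     return pick(list(defaults.items()), OrderedDict())
-- ===== Notes on version B (the rewrite author's own statement) =====
-- stated objective: faster
-- what changed: B recursively processes the defaults, and per key runs a single filter of the combinations by the selection so far, collects that key's values into a set and takes min directly, instead of rebuilding the whole per-parameter available-options dict with sorted option lists on every iteration.
import Mathlib
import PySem

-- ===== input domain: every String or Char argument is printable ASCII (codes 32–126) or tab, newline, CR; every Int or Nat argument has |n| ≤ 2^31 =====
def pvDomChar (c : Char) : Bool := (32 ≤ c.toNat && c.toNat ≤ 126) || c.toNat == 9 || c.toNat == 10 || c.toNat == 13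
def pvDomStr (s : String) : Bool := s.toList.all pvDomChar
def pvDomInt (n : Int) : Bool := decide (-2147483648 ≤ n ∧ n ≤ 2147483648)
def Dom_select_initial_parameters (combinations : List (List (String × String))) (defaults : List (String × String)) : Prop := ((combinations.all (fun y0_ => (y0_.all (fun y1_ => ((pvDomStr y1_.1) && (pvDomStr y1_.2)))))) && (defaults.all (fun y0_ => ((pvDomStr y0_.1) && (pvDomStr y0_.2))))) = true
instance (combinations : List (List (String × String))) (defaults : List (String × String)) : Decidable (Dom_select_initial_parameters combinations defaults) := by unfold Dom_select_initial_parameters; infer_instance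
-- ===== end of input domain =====

-- B recurses over the defaults and, per key, filters the combinations once against the
-- selection so far, collecting only that key's values, instead of rebuilding the whole
-- per-parameter available-options dict with sorted lists each iteration (objective: faster).

-- ===== PORT A =====
-- Python dict lookup (first match) and ordered-dict assignment, hand-written as A uses them
def pvLookup {α : Type} (d : List (String × α)) (k : String) : Option α :=
  (d.find? (fun kv => kv.1 == k)).map (·.2)

def pvAssign {α : Type} (d : List (String × α)) (k : String) (v : α) : List (String × α) :=
  if d.any (fun kv => kv.1 == k) then d.map (fun kv => if kv.1 == k then (k, v) else kv)
  else d ++ [(k, v)]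

def get_available_options (combinations : List (List (String × String)))
    (selected : List (String × String)) : List (String × List String) :=
  let all_params := PySem.List.dedup (combinations.flatMap (fun comb => comb.map (·.1)))
  all_params.foldl (fun ao param =>
    let options : PySem.Set String := combinations.foldl (fun opts comb =>
      if selected.all (fun kv => !(decide (kv.1 < param)) || (pvLookup comb kv.1 == some kv.2)) then
        if comb.any (fun kv => kv.1 == param) then
          -- comb[param]: param is a key of comb here, so getD never supplies the default
          PySem.Set.add opts ((pvLookup comb param).getD "")
        else opts
      else opts) PySem.Set.empty
    -- all_params has no duplicates (dedup), so assignment to a fresh key = append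
    if options.isEmpty then ao else ao ++ [(param, PySem.List.sorted options (fun x => x))]) []

def sipLoopA (combinations : List (List (String × String))) :
    List (String × String) → List (String × String) → List (String × String)
  | [], selected => selected
  | (key, default_value) :: rest, selected =>
    let available_options := get_available_options combinations selected
    match pvLookup available_options key with
    | some opts =>
      if opts.contains default_value then
        sipLoopA combinations rest (pvAssign selected key default_value)
      else
        -- available_options[key][0]: the stored list is nonempty by construction
        sipLoopA combinations rest (pvAssign selected key (opts.headD ""))
    | none => selected

def select_initial_parameters (combinations : List (List (String × String)))
    (defaults : List (String × String)) : List (String × String) :=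
  sipLoopA combinations defaults []

-- ===== PORT B =====
-- all(c.get(k) == v for k, v in selected.items() if k < key)
def sipMatch (selected : PySem.Dict String String) (key : String)
    (c : List (String × String)) : Bool :=
  (selected.items.filter (fun kv => decide (kv.1 < key))).all
    (fun kv => PySem.Dict.get? ⟨c⟩ kv.1 == some kv.2)

-- opts = {c[key] for c in matching if key in c}, matching = the compatible combinations
def sipOptions (combinations : List (List (String × String)))
    (selected : PySem.Dict String String) (key : String) : PySem.Set String :=
  PySem.Set.ofList
    ((combinations.filter (sipMatch selected key)).filterMap
      (fun c => PySem.Dict.get? ⟨c⟩ key))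

def sipPick (combinations : List (List (String × String))) :
    List (String × String) → PySem.Dict String String → PySem.Dict String String
  | [], selected => selected
  | (key, dv) :: rest, selected =>
    match sipOptions combinations selected key with
    | [] => selected
    | o :: os =>
      -- min(opts) over the nonempty option set, as a running fold
      sipPick combinations rest
        (selected.insert key (if (o :: os).contains dv then dv else os.foldl min o))

def select_initial_parameters_alt (combinations : List (List (String × String)))
    (defaults : List (String × String)) : List (String × String) :=
  (sipPick combinations defaults ⟨[]⟩).items

-- ===== PRECONDITION & SPEC =====
def Spec_select_initial_parameters (combinations : List (List (String × String))) (defaults : List (String × String)) (out : List (String × String)) : Prop := out = select_initial_parameters_alt combinations defaults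
instance (combinations : List (List (String × String))) (defaults : List (String × String)) (out : List (String × String)) : Decidable (Spec_select_initial_parameters combinations defaults out) := by unfold Spec_select_initial_parameters; infer_instance

-- ===== CLAIM (what is proved, stated in full; the proofs are below) =====
def Claim_equal_select_initial_parameters : Prop := ∀ (combinations : List (List (String × String))) (defaults : List (String × String)), Dom_select_initial_parameters combinations defaults → Spec_select_initial_parameters combinations defaults (select_initial_parameters combinations defaults)

-- ===== LEMMAS AND PROOFS =====

-- B's filtered-items condition is A's guarded all over the raw selection
theorem sipMatch_eq (sel : List (String × String)) (key : String) (c : List (String × String)) :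
    sipMatch ⟨sel⟩ key c =
      sel.all (fun kv => !(decide (kv.1 < key)) || (pvLookup c kv.1 == some kv.2)) := by
  simp [sipMatch, List.all_filter, pvLookup, PySem.Dict.get?]

-- 'key in c' as A tests it agrees with B's lookup succeeding
theorem any_key_eq_isSome (c : List (String × String)) (key : String) :
    c.any (fun kv => kv.1 == key) = (PySem.Dict.get? (⟨c⟩ : PySem.Dict String String) key).isSome := by
  induction c with
  | nil => rfl
  | cons kv r ih =>
    rw [List.any_cons]
    by_cases h : kv.1 == key
    · simp [PySem.Dict.get?, h]
    · rw [show (PySem.Dict.get? (⟨kv :: r⟩ : PySem.Dict String String) key) =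
          PySem.Dict.get? (⟨r⟩ : PySem.Dict String String) key by
        simp only [PySem.Dict.get?]
        rw [List.find?_cons_of_neg (by simpa using h)]]
      simpa [h] using ih

-- A's inner fold over combinations computes exactly B's option set
theorem optsA_eq (combinations : List (List (String × String)))
    (sel : List (String × String)) (key : String) :
    combinations.foldl (fun opts comb =>
      if sel.all (fun kv => !(decide (kv.1 < key)) || (pvLookup comb kv.1 == some kv.2)) then
        if comb.any (fun kv => kv.1 == key) then
          PySem.Set.add opts ((pvLookup comb key).getD "")
        else opts
      else opts) PySem.Set.empty = sipOptions combinations ⟨sel⟩ key := by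
  unfold sipOptions
  suffices h : ∀ s : PySem.Set String, combinations.foldl (fun opts comb =>
      if sel.all (fun kv => !(decide (kv.1 < key)) || (pvLookup comb kv.1 == some kv.2)) then
        if comb.any (fun kv => kv.1 == key) then
          PySem.Set.add opts ((pvLookup comb key).getD "")
        else opts
      else opts) s =
      PySem.Set.update s ((combinations.filter (sipMatch ⟨sel⟩ key)).filterMap
        (fun c => PySem.Dict.get? ⟨c⟩ key)) by
    rw [h PySem.Set.empty, PySem.Set.update_empty]
  induction combinations with
  | nil => intro s; simp [PySem.Set.update_nil]
  | cons comb rest ih =>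
    intro s
    rw [List.foldl_cons, List.filter_cons]
    by_cases hm : sel.all (fun kv => !(decide (kv.1 < key)) || (pvLookup comb kv.1 == some kv.2))
    · rw [if_pos hm]
      cases hg : PySem.Dict.get? (⟨comb⟩ : PySem.Dict String String) key with
      | none =>
        have hany : comb.any (fun kv => kv.1 == key) = false := by
          rw [any_key_eq_isSome, hg]; rfl
        rw [hany, if_neg (by simp), if_pos (by rw [sipMatch_eq]; exact hm),
          List.filterMap_cons, hg, ih]
      | some v =>
        have hany : comb.any (fun kv => kv.1 == key) = true := by
          rw [any_key_eq_isSome, hg]; rfl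
        have hpv : pvLookup comb key = some v := hg
        rw [hany, if_pos rfl, hpv, Option.getD_some, if_pos (by rw [sipMatch_eq]; exact hm),
          List.filterMap_cons, hg, ih, PySem.Set.update_cons]
    · rw [if_neg hm, if_neg (by rw [sipMatch_eq]; exact hm), ih]

-- lookup in a filtered-map association list
theorem pvLookup_filter_map (ps : List String) (c : String → Bool) (g : String → List String)
    (key : String) :
    pvLookup ((ps.filter c).map (fun p => (p, g p))) key =
      if c key = true ∧ key ∈ ps then some (g key) else none := by
  induction ps with
  | nil => simp [pvLookup]
  | cons p rest ih =>
    by_cases hp : p = key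
    · subst hp
      by_cases hc : c p = true
      · simp [pvLookup, hc]
      · simp only [List.filter_cons, hc, Bool.false_eq_true, if_false]
        rw [ih]
        simp [hc]
    · by_cases hc : c p = true
      · simp only [List.filter_cons, hc, if_true, List.map_cons]
        rw [show pvLookup ((p, g p) :: (rest.filter c).map (fun q => (q, g q))) key =
              pvLookup ((rest.filter c).map (fun q => (q, g q))) key by
          simp [pvLookup, List.find?, show (p == key) = false by simp [hp]]]
        rw [ih]
        simp [Ne.symm hp]
      · simp only [List.filter_cons, hc, Bool.false_eq_true, if_false]
        rw [ih]
        simp [Ne.symm hp]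

-- if key occurs in no combination, B's option set is empty
theorem sipOptions_nil_of_not_mem (combinations : List (List (String × String)))
    (sel : List (String × String)) (key : String)
    (h : key ∉ combinations.flatMap (fun comb => comb.map (·.1))) :
    sipOptions combinations ⟨sel⟩ key = PySem.Set.empty := by
  unfold sipOptions
  have hall : ∀ c ∈ combinations.filter (sipMatch ⟨sel⟩ key),
      PySem.Dict.get? (⟨c⟩ : PySem.Dict String String) key = none := by
    intro c hc
    have hcm : c ∈ combinations := List.mem_of_mem_filter hc
    have hk : key ∉ c.map (·.1) := fun hm =>
      h (List.mem_flatMap.mpr ⟨c, hcm, hm⟩)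
    cases hg : PySem.Dict.get? (⟨c⟩ : PySem.Dict String String) key with
    | none => rfl
    | some v =>
      exfalso
      have : c.any (fun kv => kv.1 == key) = true := by rw [any_key_eq_isSome, hg]; rfl
      obtain ⟨kv, hkv, hbe⟩ := List.any_eq_true.mp this
      exact hk (List.mem_map.mpr ⟨kv, hkv, by simpa using hbe⟩)
  rw [List.filterMap_eq_nil_iff.mpr (fun c hc => hall c hc)]
  rfl

-- A's available_options, looked up at key, in terms of B's option set
theorem lookup_gao (combinations : List (List (String × String)))
    (sel : List (String × String)) (key : String) :
    pvLookup (get_available_options combinations sel) key =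
      (if (sipOptions combinations ⟨sel⟩ key).isEmpty then none
       else some (PySem.List.sorted (sipOptions combinations ⟨sel⟩ key) (fun x => x))) := by
  unfold get_available_options
  rw [show (fun (ao : List (String × List String)) param =>
        let options : PySem.Set String := combinations.foldl (fun opts comb =>
          if sel.all (fun kv => !(decide (kv.1 < param)) || (pvLookup comb kv.1 == some kv.2)) then
            if comb.any (fun kv => kv.1 == param) then
              PySem.Set.add opts ((pvLookup comb param).getD "")
            else opts
          else opts) PySem.Set.empty
        if options.isEmpty then ao else ao ++ [(param, PySem.List.sorted options (fun x => x))]) =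
      (fun ao param => if (!(sipOptions combinations ⟨sel⟩ param).isEmpty) = true then
          ao ++ [(param, PySem.List.sorted (sipOptions combinations ⟨sel⟩ param) (fun x => x))]
        else ao) by
    funext ao param
    rw [optsA_eq combinations sel param]
    by_cases h : (sipOptions combinations ⟨sel⟩ param).isEmpty <;> simp [h]]
  rw [PySem.List.foldl_append_if]
  simp only [List.nil_append]
  rw [pvLookup_filter_map]
  by_cases he : (sipOptions combinations ⟨sel⟩ key).isEmpty
  · simp [he]
  · have hmem : key ∈ PySem.List.dedup (combinations.flatMap (fun comb => comb.map (·.1))) := by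
      rw [PySem.List.mem_dedup]
      by_contra hnm
      exact he (by rw [sipOptions_nil_of_not_mem combinations sel key hnm]; rfl)
    rw [if_pos ⟨by simpa using he, hmem⟩]
    simp [he]

-- membership in the sorted list = membership in the set
theorem contains_sorted (l : List String) (x : String) :
    (PySem.List.sorted l (fun y => y)).contains x = l.contains x := by
  by_cases hx : x ∈ l
  · simp [List.contains_eq_mem, hx, (PySem.List.mem_sorted l (fun y => y) false x).mpr hx]
  · simp [List.contains_eq_mem, hx, PySem.List.mem_sorted l (fun y => y) false x]

-- head of A's sorted option list = B's running minimum over the set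
theorem headD_sorted_eq_foldl_min (o : String) (os : List String) :
    (PySem.List.sorted (o :: os) (fun x => x)).headD "" = os.foldl min o := by
  have hnil : PySem.List.sorted (o :: os) (fun x => x) ≠ [] := by
    rw [Ne, PySem.List.sorted_eq_nil_iff]; simp
  obtain ⟨m, t, hs⟩ := List.exists_cons_of_ne_nil hnil
  have hmin : PySem.List.min? (o :: os) (fun x => x) = some (os.foldl min o) :=
    PySem.List.min?_id_cons o os
  have hmmem : m ∈ o :: os := (PySem.List.mem_sorted (o :: os) (fun x => x) false m).mp
    (by rw [hs]; exact List.mem_cons_self)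
  have hm'mem : os.foldl min o ∈ o :: os := PySem.List.min?_mem hmin
  have h1 : m ≤ os.foldl min o := PySem.List.key_head_sorted_le (o :: os) (fun x => x) hs _ hm'mem
  have h2 : os.foldl min o ≤ m := PySem.List.min?_isMin hmin m hmmem
  rw [hs]
  simpa using le_antisymm h1 h2

-- A's ordered-dict assignment is B's Dict.insert, item for item
theorem pvAssign_eq_insert (sel : List (String × String)) (k v : String) :
    pvAssign sel k v = ((⟨sel⟩ : PySem.Dict String String).insert k v).items := by
  unfold pvAssign PySem.Dict.insert PySem.Dict.contains
  by_cases h : sel.any (fun kv => kv.1 == k) <;> simp [h]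

-- the two loops agree from any accumulated selection
theorem sipLoop_eq (combinations : List (List (String × String)))
    (defaults : List (String × String)) :
    ∀ sel, sipLoopA combinations defaults sel = (sipPick combinations defaults ⟨sel⟩).items := by
  induction defaults with
  | nil => intro sel; rfl
  | cons kv rest ih =>
    intro sel
    obtain ⟨key, dv⟩ := kv
    rw [sipLoopA, sipPick]
    simp only [lookup_gao combinations sel key]
    cases ho : sipOptions combinations ⟨sel⟩ key with
    | nil => simp
    | cons o os =>
      have hne : (sipOptions combinations ⟨sel⟩ key).isEmpty = false := by simp [ho]
      simp only [ho] at hne ⊢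
      simp only [List.isEmpty_cons, Bool.false_eq_true, if_false]
      rw [contains_sorted]
      by_cases hc : (o :: os).contains dv
      · rw [if_pos hc, pvAssign_eq_insert, ih, if_pos hc]
      · rw [if_neg hc, headD_sorted_eq_foldl_min, pvAssign_eq_insert, ih, if_neg hc]

-- ===== VERDICT (by name: the statement is the Claim_ definition above) =====
theorem select_initial_parameters_spec : Claim_equal_select_initial_parameters := by
  intro combinations defaults _
  unfold Spec_select_initial_parameters select_initial_parameters select_initial_parameters_alt
  exact sipLoop_eq combinations defaults []
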